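-- pv_equiv track=rewrite | github.com/baiwan-chenhao/rewrite | leetcode_gen_week2.py | solve
-- ===== SOURCE A (Python) =====
-- from typing import List, Tuple
--
-- def solve(nums1: List[int], nums2: List[int], k: int) -> List[int]:
--     from heapq import heappush, heappop
--     a = sorted((x, y, i) for i, (x, y) in enumerate(zip(nums1, nums2)))
--     n = len(a)
--     ans = [0] * n
--     h = []
--     s = 0
--     for i, (x, y, idx) in enumerate(a):
--         ans[idx] = ans[a[i - 1][2]] if i and x == a[i - 1][0] else s
--         s += y
--         heappush(h, y)
--         if len(h) > k:
--             s -= heappop(h)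
--     return ans
-- ===== SOURCE B (Python) =====
-- from typing import List
--
-- def solve(nums1: List[int], nums2: List[int], k: int) -> List[int]:
--     from heapq import nlargest
--     pairs = list(zip(nums1, nums2))
--     return [sum(nlargest(k, [y2 for x2, y2 in pairs if x2 < x1]))
--             for x1, _ in pairs]
-- ===== Notes on version B (the rewrite author's own statement) =====
-- stated objective: alternative
-- what changed: B drops A's sort-and-sweep with an incremental size-k min-heap entirely: for each pair it directly filters the pairs with strictly smaller nums1 and sums heapq.nlargest(k, ...) of their nums2 values (direct per-element top-k computation instead of a sorted sweep carrying heap state).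
import Mathlib
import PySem

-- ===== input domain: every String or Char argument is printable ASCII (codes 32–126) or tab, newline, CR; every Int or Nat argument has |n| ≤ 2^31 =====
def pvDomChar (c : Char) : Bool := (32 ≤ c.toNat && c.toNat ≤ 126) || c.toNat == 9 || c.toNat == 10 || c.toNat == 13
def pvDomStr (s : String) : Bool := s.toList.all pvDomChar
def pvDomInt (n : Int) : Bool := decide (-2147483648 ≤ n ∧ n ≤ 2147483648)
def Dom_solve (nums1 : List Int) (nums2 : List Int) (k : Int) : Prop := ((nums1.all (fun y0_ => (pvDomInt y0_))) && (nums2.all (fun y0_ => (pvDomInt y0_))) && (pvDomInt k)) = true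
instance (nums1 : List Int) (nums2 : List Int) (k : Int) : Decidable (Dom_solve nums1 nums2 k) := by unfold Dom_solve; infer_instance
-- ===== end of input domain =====

-- B abandons A's sort + incremental size-k min-heap sweep: for every pair it directly sums
-- heapq.nlargest(k, ...) of the nums2 values whose nums1 is strictly smaller (quadratic brute
-- force, a different algorithm of simpler shape; not faster than A).

-- ===== PORT A =====
-- a = sorted((x, y, i) for i, (x, y) in enumerate(zip(nums1, nums2))).
-- The enumerate indices i are distinct and strictly increasing in input order, so Python's
-- lexicographic sort of the (x, y, i) tuples equals the STABLE sort by the key (x, y):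
-- PySem.List.sorted2 is exact here.
def pvTriples (nums1 : List Int) (nums2 : List Int) : List (Int × Int × Int) :=
  PySem.List.sorted2 ((PySem.List.enumerate (nums1.zip nums2)).map
    (fun p => (p.2.1, p.2.2, p.1))) (fun t => t.1) (fun t => t.2.1)

-- heapq modelled as a sorted list: h is only observed through len(h) and heappop (which
-- returns the minimum), so the sorted-list priority queue is exact for every value this
-- program computes.
def heapPush : List Int → Int → List Int
  | [], y => [y]
  | m :: t, y => if y ≤ m then y :: m :: t else m :: heapPush t y

-- A's loop; prev carries a[i-1] (so 'i and x == a[i-1][0]' is the match on prev), the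
-- tie branch READS ans at a[i-1][2] as Python does.  All indices idx come from enumerate,
-- hence are ≥ 0 and < len(ans), so set/getD on idx.toNat are exact (no wraparound reachable).
def aloop (k : Int) : List (Int × Int × Int) → Option (Int × Int × Int) →
    List Int → List Int → Int → List Int
  | [], _, ans, _, _ => ans
  | (x, y, idx) :: rest, prev, ans, h, s =>
    let v : Int := match prev with
      | some (px, _, pidx) => if x = px then ans.getD pidx.toNat 0 else s
      | none => s
    let ans' := ans.set idx.toNat v
    let s' := s + y
    let h' := heapPush h y
    let hs := if (h'.length : Int) > k then (h'.tail, s' - h'.headD 0) else (h', s')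
    aloop k rest (some (x, y, idx)) ans' hs.1 hs.2

def solve (nums1 : List Int) (nums2 : List Int) (k : Int) : List Int :=
  let a := pvTriples nums1 nums2
  aloop k a none (List.replicate a.length 0) [] 0

-- ===== PORT B =====
-- Source B: pairs = list(zip(nums1, nums2));
--       return [sum(nlargest(k, [y2 for x2, y2 in pairs if x2 < x1])) for x1, _ in pairs]
-- heapq.nlargest(k, v) = sorted(v, reverse=True)[:k] (documented equivalence, [] for k <= 0):
-- ported as PySem.List.sorted … true |>.take k.toNat.
def solve_alt (nums1 : List Int) (nums2 : List Int) (k : Int) : List Int :=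
  let pairs := nums1.zip nums2
  pairs.map (fun p =>
    ((PySem.List.sorted ((pairs.filter (fun q => q.1 < p.1)).map (fun q => q.2))
        (fun v => v) true).take k.toNat).sum)

-- ===== PRECONDITION & SPEC =====
def Spec_solve (nums1 : List Int) (nums2 : List Int) (k : Int) (out : List Int) : Prop := out = solve_alt nums1 nums2 k
instance (nums1 : List Int) (nums2 : List Int) (k : Int) (out : List Int) : Decidable (Spec_solve nums1 nums2 k out) := by unfold Spec_solve; infer_instance

-- ===== CLAIM (what is proved, stated in full; the proofs are below) =====
def Claim_equal_solve : Prop := ∀ (nums1 : List Int) (nums2 : List Int) (k : Int), Dom_solve nums1 nums2 k → Spec_solve nums1 nums2 k (solve nums1 nums2 k)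

-- ===== LEMMAS AND PROOFS =====

-- Proof-internal bridge: one heap step of A's sweep (push y, pop the min when the heap
-- exceeds k), and the group-wise reformulation 'bloop' of A's loop.
def hstep (k : Int) (p : List Int × Int) (y : Int) : List Int × Int :=
  let s2 := p.2 + y
  let h2 := heapPush p.1 y
  if (h2.length : Int) > k then (h2.tail, s2 - h2.headD 0) else (h2, s2)

def bloop (k : Int) : List (Int × Int × Int) → List Int → List Int → Int → List Int
  | [], ans, _, _ => ans
  | t :: rest, ans, h, s =>
    let g := t :: rest.takeWhile (fun u => u.1 == t.1)
    let rest' := rest.dropWhile (fun u => u.1 == t.1)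
    let ans' := g.foldl (fun ac u => ac.set u.2.2.toNat s) ans
    let hs := g.foldl (fun (p : List Int × Int) u => hstep k p u.2.1) (h, s)
    bloop k rest' ans' hs.1 hs.2
  termination_by a => a.length
  decreasing_by
    simp only [List.length_cons]
    exact Nat.lt_succ_of_le (List.length_dropWhile_le _ _)

-- insertion sort via heapPush, the ascending mirror of the heap's content
def asort (l : List Int) : List Int := l.foldl heapPush []

-- the k largest values of l, as the ascending suffix of the sorted list
def topk (k : Int) (l : List Int) : List Int := (asort l).drop (l.length - k.toNat)

-- the value A's sweep assigns to an element with first component x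
def gval (k : Int) (full : List (Int × Int × Int)) (x : Int) : Int :=
  (topk k ((full.filter (fun u => u.1 < x)).map (fun u => u.2.1))).sum

-- ---- heapPush facts ----
lemma heapPush_perm (h : List Int) (y : Int) : (heapPush h y).Perm (y :: h) := by
  induction h with
  | nil => simp [heapPush]
  | cons m t ih =>
    by_cases hy : y ≤ m
    · simp [heapPush, hy]
    · simp only [heapPush, if_neg hy]
      exact (ih.cons m).trans (List.Perm.swap y m t)

lemma heapPush_sorted (h : List Int) (y : Int) (hs : h.Pairwise (· ≤ ·)) :
    (heapPush h y).Pairwise (· ≤ ·) := by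
  induction h with
  | nil => simp [heapPush]
  | cons m t ih =>
    rw [List.pairwise_cons] at hs
    by_cases hy : y ≤ m
    · simp only [heapPush, if_pos hy]
      refine List.Pairwise.cons ?_ (List.Pairwise.cons hs.1 hs.2)
      intro e he
      rcases List.mem_cons.mp he with rfl | he'
      · exact hy
      · exact le_trans hy (hs.1 e he')
    · simp only [heapPush, if_neg hy]
      refine List.Pairwise.cons ?_ (ih hs.2)
      intro e he
      rcases List.mem_cons.mp ((heapPush_perm t y).mem_iff.mp he) with rfl | he'
      · exact le_of_not_ge hy
      · exact hs.1 e he'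

lemma heapPush_of_le (h : List Int) (y : Int) (hy : ∀ e ∈ h, y ≤ e) :
    heapPush h y = y :: h := by
  cases h with
  | nil => rfl
  | cons m t => simp [heapPush, hy m (by simp)]

lemma tail_heapPush_drop (y : Int) :
    ∀ (m : Nat) (L : List Int), L.Pairwise (· ≤ ·) →
    (heapPush (L.drop m) y).tail = (heapPush L y).drop (m + 1) := by
  intro m
  induction m with
  | zero => intro L _; simp [← List.drop_one]
  | succ m ih =>
    intro L hL
    cases L with
    | nil => simp [heapPush]
    | cons a t =>
      rw [List.pairwise_cons] at hL
      by_cases hy : y ≤ a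
      · have hall : ∀ e ∈ t.drop m, y ≤ e := fun e he =>
          le_trans hy (hL.1 e (List.drop_subset m t he))
        simp only [List.drop_succ_cons, heapPush, if_pos hy]
        rw [heapPush_of_le _ _ hall]
        simp
      · simp only [List.drop_succ_cons, heapPush, if_neg hy]
        rw [ih t hL.2]

-- ---- asort facts ----
lemma foldl_heapPush_perm : ∀ (l acc : List Int), (l.foldl heapPush acc).Perm (acc ++ l) := by
  intro l
  induction l with
  | nil => intro acc; simp
  | cons a t ih =>
    intro acc
    refine (ih (heapPush acc a)).trans ?_
    refine ((heapPush_perm acc a).append_right t).trans ?_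
    exact List.Perm.symm (List.perm_middle (a := a) (l₁ := acc) (l₂ := t))

lemma asort_perm (l : List Int) : (asort l).Perm l := by
  simpa using foldl_heapPush_perm l []

lemma foldl_heapPush_sorted : ∀ (l acc : List Int), acc.Pairwise (· ≤ ·) →
    (l.foldl heapPush acc).Pairwise (· ≤ ·) := by
  intro l
  induction l with
  | nil => intro acc h; simpa
  | cons a t ih => intro acc h; exact ih _ (heapPush_sorted _ _ h)

lemma asort_sorted (l : List Int) : (asort l).Pairwise (· ≤ ·) :=
  foldl_heapPush_sorted l [] (by simp)

lemma sum_tail_of_ne_nil (h2 : List Int) (hne : h2 ≠ []) :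
    h2.sum - h2.headD 0 = h2.tail.sum := by
  cases h2 with
  | nil => simp at hne
  | cons c r => simp [List.sum_cons]

lemma asort_append_singleton (l : List Int) (y : Int) :
    asort (l ++ [y]) = heapPush (asort l) y := by
  simp [asort, List.foldl_append]

lemma hstep_topk (k y : Int) (l : List Int) :
    hstep k (topk k l, (topk k l).sum) y = (topk k (l ++ [y]), (topk k (l ++ [y])).sum) := by
  have hL : (asort l).Pairwise (· ≤ ·) := asort_sorted l
  have hlen : (asort l).length = l.length := (asort_perm l).length_eq
  have hnew : asort (l ++ [y]) = heapPush (asort l) y := asort_append_singleton l y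
  have hplen : (heapPush (asort l) y).length = l.length + 1 := by
    rw [(heapPush_perm (asort l) y).length_eq]; simp [hlen]
  by_cases hcase : l.length < k.toNat
  · -- the heap is not yet full: no pop
    have hm : l.length - k.toNat = 0 := by omega
    have hm' : l.length + 1 - k.toNat = 0 := by omega
    have htk : topk k l = asort l := by simp [topk, hm]
    have htk' : topk k (l ++ [y]) = heapPush (asort l) y := by
      simp [topk, hnew, hm']
    have hcond : ¬ ((heapPush (asort l) y).length : Int) > k := by
      rw [hplen]; omega
    simp only [hstep, htk, htk', if_neg hcond, Prod.mk.injEq]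
    refine ⟨by trivial, ?_⟩
    rw [(heapPush_perm (asort l) y).sum_eq]
    simp [add_comm]
  · -- full heap: push then pop the minimum
    have hm' : l.length + 1 - k.toNat = (l.length - k.toNat) + 1 := by omega
    have hcond : ((heapPush (topk k l) y).length : Int) > k := by
      have h1 : (heapPush (topk k l) y).length = (topk k l).length + 1 :=
        (heapPush_perm _ y).length_eq
      have h2 : (topk k l).length = k.toNat := by
        simp only [topk, List.length_drop, hlen]; omega
      have := Int.self_le_toNat k
      rw [h1, h2]
      omega
    have htail : (heapPush (topk k l) y).tail = topk k (l ++ [y]) := by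
      rw [show topk k l = (asort l).drop (l.length - k.toNat) from rfl,
        tail_heapPush_drop y _ _ hL]
      simp [topk, hnew, hm']
    have hsum : (topk k l).sum + y - (heapPush (topk k l) y).headD 0
        = (topk k (l ++ [y])).sum := by
      rw [← htail, ← sum_tail_of_ne_nil]
      · rw [(heapPush_perm (topk k l) y).sum_eq]; simp [add_comm]
      · intro hnil
        have := (heapPush_perm (topk k l) y).length_eq
        rw [hnil] at this
        simp at this
    simp only [hstep, if_pos hcond, Prod.mk.injEq]
    exact ⟨htail, hsum⟩


lemma foldl_hstep (k : Int) (l : List Int) :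
    l.foldl (hstep k) ([], 0) = (topk k l, (topk k l).sum) := by
  induction l using List.reverseRecOn with
  | nil => simp [topk, asort]
  | append_singleton l y ih => rw [List.foldl_append, List.foldl_cons, List.foldl_nil, ih, hstep_topk]

-- ---- sortedness (first key) of the sorted2 output ----
lemma insertBy_pairwise_of {α : Type} (before : α → α → Bool) (R : α → α → Prop)
    (h1 : ∀ a b, before a b = true → R a b) (h2 : ∀ a b, before a b = false → R b a)
    (htr : ∀ a b c, R a b → R b c → R a c) (x : α) :
    ∀ ys : List α, ys.Pairwise R → (PySem.List.insertBy before x ys).Pairwise R := by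
  intro ys
  induction ys with
  | nil => intro _; simp [PySem.List.insertBy]
  | cons y ys ih =>
    intro hp
    rw [List.pairwise_cons] at hp
    by_cases hb : before x y
    · rw [show PySem.List.insertBy before x (y :: ys) = x :: y :: ys from by
        simp [PySem.List.insertBy, hb]]
      refine List.Pairwise.cons ?_ (List.Pairwise.cons hp.1 hp.2)
      intro e he
      rcases List.mem_cons.mp he with rfl | he'
      · exact h1 x e hb
      · exact htr x y e (h1 x y hb) (hp.1 e he')
    · rw [show PySem.List.insertBy before x (y :: ys) = y :: PySem.List.insertBy before x ys from by
        simp [PySem.List.insertBy, hb]]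
      refine List.Pairwise.cons ?_ (ih hp.2)
      intro e he
      rcases (PySem.List.mem_insertBy before x e ys).mp he with rfl | he'
      · exact h2 e y (by simpa using hb)
      · exact hp.1 e he'

lemma foldl_insertBy_pairwise {α : Type} (before : α → α → Bool) (R : α → α → Prop)
    (h1 : ∀ a b, before a b = true → R a b) (h2 : ∀ a b, before a b = false → R b a)
    (htr : ∀ a b c, R a b → R b c → R a c) :
    ∀ (l acc : List α), acc.Pairwise R →
    (l.foldl (fun acc x => PySem.List.insertBy before x acc) acc).Pairwise R := by
  intro l
  induction l with
  | nil => intro acc h; simpa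
  | cons a t ih =>
    intro acc h
    exact ih _ (insertBy_pairwise_of before R h1 h2 htr a acc h)

lemma pvTriples_pairwise (nums1 nums2 : List Int) :
    (pvTriples nums1 nums2).Pairwise (fun u v => u.1 ≤ v.1) := by
  refine foldl_insertBy_pairwise
    (fun a b : Int × Int × Int =>
      decide (a.1 < b.1) || (!decide (b.1 < a.1) && decide (a.2.1 < b.2.1)))
    (fun u v => u.1 ≤ v.1) ?_ ?_ ?_ _ [] (by simp)
  · intro a b hb
    simp only [Bool.or_eq_true, decide_eq_true_eq, Bool.and_eq_true,
      Bool.not_eq_true', decide_eq_false_iff_not] at hb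
    rcases hb with hb | hb
    · exact le_of_lt hb
    · exact le_of_not_gt hb.1
  · intro a b hb
    simp only [Bool.or_eq_false_iff, decide_eq_false_iff_not] at hb
    exact le_of_not_gt hb.1
  · intro a b c hab hbc
    exact le_trans hab hbc

-- ---- A's loop equals the group-wise loop ----
lemma aloop_run (k x w : Int) :
    ∀ (g rest' : List (Int × Int × Int)) (ans h : List Int) (s py pidx : Int),
    (∀ u ∈ g, u.1 = x) → (∀ u ∈ g, u.2.2.toNat < ans.length) →
    ans.getD pidx.toNat 0 = w →
    aloop k (g ++ rest') (some (x, py, pidx)) ans h s =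
      aloop k rest' (some (g.getLastD (x, py, pidx)))
        (g.foldl (fun ac u => ac.set u.2.2.toNat w) ans)
        (g.foldl (fun (p : List Int × Int) u => hstep k p u.2.1) (h, s)).1
        (g.foldl (fun (p : List Int × Int) u => hstep k p u.2.1) (h, s)).2 := by
  intro g
  induction g with
  | nil => intro rest' ans h s py pidx _ _ _; simp [List.foldl]
  | cons u g ih =>
    intro rest' ans h s py pidx hx hlen hw
    obtain ⟨x', y', idx'⟩ := u
    have hx' : x' = x := hx (x', y', idx') (by simp)
    subst hx'
    have hidx : idx'.toNat < ans.length := hlen (x', y', idx') (by simp)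
    simp only [List.cons_append, aloop, hw, List.foldl_cons, List.getLastD_cons]
    rw [show hstep k (h, s) y' = (if ((heapPush h y').length : Int) > k
        then ((heapPush h y').tail, s + y' - (heapPush h y').headD 0)
        else (heapPush h y', s + y')) from rfl]
    exact ih rest' (ans.set idx'.toNat w) _ _ y' idx'
      (fun v hv => hx v (by simp [hv]))
      (fun v hv => by simpa using hlen v (by simp [hv]))
      (by simp [List.getD, hidx])

lemma head_dropWhile_false {α : Type} (p : α → Bool) :
    ∀ (l : List α) (u : α), (l.dropWhile p).head? = some u → p u = false := by
  intro l
  induction l with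
  | nil => intro u h; simp [List.dropWhile] at h
  | cons a l ih =>
    intro u h
    by_cases hp : p a
    · exact ih u (by simpa [List.dropWhile, hp] using h)
    · simp [List.dropWhile, hp] at h
      simpa [← h] using hp

lemma length_foldl_set (g : List (Int × Int × Int)) (w : Int) :
    ∀ ans : List Int, (g.foldl (fun ac u => ac.set u.2.2.toNat w) ans).length = ans.length := by
  induction g with
  | nil => intro ans; rfl
  | cons u g ih => intro ans; simp [List.foldl_cons, ih]

lemma aloop_eq_bloop (k : Int) :
    ∀ (n : Nat) (a : List (Int × Int × Int)) (prev : Option (Int × Int × Int))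
      (ans h : List Int) (s : Int), a.length ≤ n →
    (∀ u ∈ a, u.2.2.toNat < ans.length) →
    (∀ p, prev = some p → ∀ u, a.head? = some u → p.1 ≠ u.1) →
    aloop k a prev ans h s = bloop k a ans h s := by
  intro n
  induction n with
  | zero =>
    intro a prev ans h s hn _ _
    have : a = [] := List.length_eq_zero_iff.mp (Nat.le_zero.mp hn)
    subst this
    cases prev with
    | none => simp [aloop, bloop]
    | some p => obtain ⟨px, py, pidx⟩ := p; simp [aloop, bloop]
  | succ n ih =>
    intro a prev ans h s hn hlen hprev
    match a with
    | [] =>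
      cases prev with
      | none => simp [aloop, bloop]
      | some p => obtain ⟨px, py, pidx⟩ := p; simp [aloop, bloop]
    | (x, y, idx) :: rest =>
      have hne : ∀ p : Int × Int × Int, prev = some p → p.1 ≠ x :=
        fun p hp => hprev p hp (x, y, idx) rfl
      set g := rest.takeWhile (fun u => u.1 == x) with hg
      set rest' := rest.dropWhile (fun u => u.1 == x) with hrest'
      have hsplit : rest = g ++ rest' := (List.takeWhile_append_dropWhile).symm
      have hidx : idx.toNat < ans.length := hlen (x, y, idx) (by simp)
      have hgx : ∀ u ∈ g, u.1 = x := by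
        intro u hu
        have := List.mem_takeWhile_imp hu
        simpa using this
      have hglen : ∀ u ∈ g, u.2.2.toNat < (ans.set idx.toNat s).length := by
        intro u hu
        have : u ∈ rest := by rw [hsplit]; exact List.mem_append_left _ hu
        simpa using hlen u (by simp [this])
      have hget : (ans.set idx.toNat s).getD idx.toNat 0 = s := by
        simp [List.getD, hidx]
      have stepA :
          aloop k ((x, y, idx) :: rest) prev ans h s =
          aloop k (g ++ rest') (some (x, y, idx)) (ans.set idx.toNat s)
            (hstep k (h, s) y).1 (hstep k (h, s) y).2 := by
        rw [← hsplit]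
        cases prev with
        | none => rfl
        | some p =>
          obtain ⟨px, py', pidx⟩ := p
          have hpx : px ≠ x := hne _ rfl
          simp only [aloop, hstep, if_neg (fun hh => hpx (Eq.symm hh))]
      rw [stepA, aloop_run k x s g rest' _ _ _ y idx hgx hglen hget]
      have hlast : (g.getLastD (x, y, idx)).1 = x := by
        rcases List.eq_nil_or_concat g with hnil | ⟨l, u, hlu⟩
        · simp [hnil]
        · rw [hlu, List.concat_eq_append, List.getLastD_concat]
          exact hgx u (by simp [hlu])
      have hIH : ∀ (hh : List Int) (ss : Int), aloop k rest' (some (g.getLastD (x, y, idx)))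
            (g.foldl (fun ac u => ac.set u.2.2.toNat s) (ans.set idx.toNat s))
            hh ss = bloop k rest' (g.foldl (fun ac u => ac.set u.2.2.toNat s) (ans.set idx.toNat s)) hh ss := by
        intro hh ss
        apply ih
        · have h1 : rest'.length ≤ rest.length := List.length_dropWhile_le _ _
          have h2 : rest.length + 1 ≤ n + 1 := by simpa using hn
          omega
        · intro u hu
          have hu' : u ∈ rest := by
            rw [hsplit]; exact List.mem_append_right _ hu
          have := hlen u (by simp [hu'])
          simpa [length_foldl_set] using this
        · intro p hp u hu
          have hfalse := head_dropWhile_false (fun u => u.1 == x) rest u (by rw [← hrest']; exact hu)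
          injection hp with hp
          subst hp
          rw [hlast]
          intro hc
          simp [← hc] at hfalse
      rw [hIH]
      conv_rhs => rw [bloop]
      simp only [← hg, ← hrest', List.foldl_cons]

-- ---- the group-wise loop writes gval everywhere ----
lemma bloop_char (k : Int) (full : List (Int × Int × Int))
    (hsor : full.Pairwise (fun u v => u.1 ≤ v.1)) :
    ∀ (n : Nat) (rem done : List (Int × Int × Int)) (ans : List Int), rem.length ≤ n →
    full = done ++ rem →
    (∀ u ∈ done, ∀ v ∈ rem, u.1 < v.1) →
    bloop k rem ans ((done.map (fun u => u.2.1)).foldl (hstep k) ([], 0)).1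
        ((done.map (fun u => u.2.1)).foldl (hstep k) ([], 0)).2
      = rem.foldl (fun ac u => ac.set u.2.2.toNat (gval k full u.1)) ans := by
  intro n
  induction n with
  | zero =>
    intro rem done ans hn _ _
    have : rem = [] := List.length_eq_zero_iff.mp (Nat.le_zero.mp hn)
    subst this
    simp [bloop]
  | succ n ih =>
    intro rem done ans hn hfull hcross
    match rem with
    | [] => simp [bloop]
    | t :: rest =>
      set g := rest.takeWhile (fun u => u.1 == t.1) with hg
      set rest' := rest.dropWhile (fun u => u.1 == t.1) with hrest'
      have hsplit : rest = g ++ rest' := (List.takeWhile_append_dropWhile).symm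
      have hgx : ∀ u ∈ g, u.1 = t.1 := fun u hu => by
        simpa using List.mem_takeWhile_imp hu
      have hpw := List.pairwise_append.mp (hfull ▸ hsor)
      have hpr := List.pairwise_cons.mp hpw.2.1
      have ht1 : ∀ v ∈ rest, t.1 ≤ v.1 := hpr.1
      -- the elements already consumed are exactly those with a strictly smaller first key
      have hfilter : full.filter (fun u => decide (u.1 < t.1)) = done := by
        rw [hfull, List.filter_append]
        have h1 : done.filter (fun u => decide (u.1 < t.1)) = done :=
          List.filter_eq_self.mpr (fun u hu => by
            simpa using hcross u hu t (by simp))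
        have h2 : (t :: rest).filter (fun u => decide (u.1 < t.1)) = [] :=
          List.filter_eq_nil_iff.mpr (fun v hv => by
            rcases List.mem_cons.mp hv with rfl | hv'
            · simp
            · simpa using not_lt.mpr (ht1 v hv'))
        rw [h1, h2, List.append_nil]
      have hgval : gval k full t.1
          = ((done.map (fun u => u.2.1)).foldl (hstep k) ([], 0)).2 := by
        rw [show (done.map (fun u => u.2.1)).foldl (hstep k) ([], 0)
            = (topk k (done.map (fun u => u.2.1)),
               (topk k (done.map (fun u => u.2.1))).sum) from foldl_hstep k _]
        simp only [gval, hfilter]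
      -- every element of rest' has a strictly larger first key than t
      have hrest'lt : ∀ v ∈ rest', t.1 < v.1 := by
        have hsub : rest'.Sublist rest := hrest' ▸ List.dropWhile_sublist _
        have hpr' : rest'.Pairwise (fun u v => u.1 ≤ v.1) := hpr.2.sublist hsub
        cases hcons : rest' with
        | nil => intro v hv; simp at hv
        | cons w ws =>
          intro v hv
          have hwrest : w ∈ rest := hsub.mem (by rw [hcons]; simp)
          have hwne : (w.1 == t.1) = false :=
            head_dropWhile_false (fun u => u.1 == t.1) rest w (by rw [← hrest', hcons]; rfl)
          have hwgt : t.1 < w.1 :=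
            lt_of_le_of_ne (ht1 w hwrest) (fun he => by simp [← he] at hwne)
          rcases List.mem_cons.mp hv with rfl | hv'
          · exact hwgt
          · have hpw' := hcons ▸ hpr'
            exact lt_of_lt_of_le hwgt ((List.pairwise_cons.mp hpw').1 v hv')
      -- recursive step
      have hrec := ih rest' (done ++ (t :: g)) ((t :: g).foldl
          (fun ac u => ac.set u.2.2.toNat (gval k full u.1)) ans)
        (by
          have h1 : rest'.length ≤ rest.length := hrest' ▸ List.length_dropWhile_le _ _
          have h2 : rest.length + 1 ≤ n + 1 := by simpa using hn
          omega)
        (by rw [hfull, hsplit, List.append_assoc]; simp)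
        (by
          intro u hu v hv
          rcases List.mem_append.mp hu with hu' | hu'
          · exact lt_trans (hcross u hu' t (by simp)) (hrest'lt v hv)
          · rcases List.mem_cons.mp hu' with rfl | hu''
            · exact hrest'lt v hv
            · exact (hgx u hu'') ▸ hrest'lt v hv)
      -- unfold bloop once and line both sides up
      rw [bloop]
      simp only [← hg, ← hrest']
      have hstate : ((t :: g).foldl (fun (p : List Int × Int) u => hstep k p u.2.1)
            (((done.map (fun u => u.2.1)).foldl (hstep k) ([], 0)).1,
             ((done.map (fun u => u.2.1)).foldl (hstep k) ([], 0)).2))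
          = (((done ++ (t :: g)).map (fun u => u.2.1)).foldl (hstep k) ([], 0)) := by
        rw [List.map_append, List.foldl_append, List.foldl_map, List.foldl_map]
      have hwrites : (t :: g).foldl (fun ac u => ac.set u.2.2.toNat
            ((done.map (fun u => u.2.1)).foldl (hstep k) ([], 0)).2) ans
          = (t :: g).foldl (fun ac u => ac.set u.2.2.toNat (gval k full u.1)) ans := by
        refine PySem.List.foldl_congr_mem _ _ _ _ ?_
        intro ac u hu
        rcases List.mem_cons.mp hu with rfl | hu'
        · rw [hgval]
        · rw [hgx u hu', hgval]
      rw [hwrites, hstate, hrec]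
      rw [show (t :: rest).foldl (fun ac u => ac.set u.2.2.toNat (gval k full u.1)) ans
          = rest.foldl (fun ac u => ac.set u.2.2.toNat (gval k full u.1))
              (ans.set t.2.2.toNat (gval k full t.1)) from rfl,
        hsplit, List.foldl_append]
      rfl

-- ---- from the write list to B's map ----
lemma triples_idx_lt (nums1 nums2 : List Int) :
    ∀ u ∈ pvTriples nums1 nums2, u.2.2.toNat < (pvTriples nums1 nums2).length := by
  intro u hu
  have hperm := PySem.List.sorted2_perm
    ((PySem.List.enumerate (nums1.zip nums2)).map (fun p => (p.2.1, p.2.2, p.1)))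
    (fun t : Int × Int × Int => t.1) (fun t => t.2.1) false
  have hmem : u ∈ (PySem.List.enumerate (nums1.zip nums2)).map (fun p => (p.2.1, p.2.2, p.1)) :=
    hperm.mem_iff.mp hu
  have hlen : (pvTriples nums1 nums2).length
      = (nums1.zip nums2).length := by
    unfold pvTriples
    rw [hperm.length_eq]
    simp [PySem.List.length_enumerate]
  obtain ⟨p, hp, hpu⟩ := List.mem_map.mp hmem
  obtain ⟨j, hj, hpe⟩ := (PySem.List.mem_enumerate_iff _ _ _).mp hp
  subst hpe
  simp only [← hpu]
  omega

-- ---- multiset invariance and the descending-sort bridge ----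
lemma topk_sum_perm (k : Int) {l1 l2 : List Int} (h : l1.Perm l2) :
    (topk k l1).sum = (topk k l2).sum := by
  have hs : asort l1 = asort l2 :=
    List.Perm.eq_of_pairwise (fun a b _ _ h1 h2 => le_antisymm h1 h2)
      (asort_sorted l1) (asort_sorted l2)
      ((asort_perm l1).trans (h.trans (asort_perm l2).symm))
  simp [topk, hs, h.length_eq]

lemma take_dsort_sum (k : Int) (v : List Int) :
    ((PySem.List.sorted v (fun x => x) true).take k.toNat).sum = (topk k v).sum := by
  have hd : PySem.List.sorted v (fun x => x) true = (asort v).reverse := by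
    refine List.Perm.eq_of_pairwise (le := fun a b : Int => b ≤ a)
      (fun a b _ _ h1 h2 => le_antisymm h2 h1) ?_ ?_ ?_
    · exact PySem.List.sorted_pairwise_rev v (fun x => x)
    · rw [List.pairwise_reverse]
      exact asort_sorted v
    · exact (PySem.List.sorted_perm v (fun x => x) true).trans
        ((asort_perm v).symm.trans (asort v).reverse_perm.symm)
  rw [hd, List.take_reverse, List.sum_reverse]
  simp [topk, (asort_perm v).length_eq]

lemma filter_map_triples (nums1 nums2 : List Int) (c : Int) :
    (((pvTriples nums1 nums2).filter (fun u => decide (u.1 < c))).map (fun u => u.2.1)).Perm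
      (((nums1.zip nums2).filter (fun q => decide (q.1 < c))).map (fun q => q.2)) := by
  have hperm := PySem.List.sorted2_perm
    ((PySem.List.enumerate (nums1.zip nums2)).map (fun p => (p.2.1, p.2.2, p.1)))
    (fun t : Int × Int × Int => t.1) (fun t => t.2.1) false
  have h1 := ((hperm.filter (fun u => decide (u.1 < c))).map (fun u => u.2.1))
  refine h1.trans ?_
  have h2 : ((((PySem.List.enumerate (nums1.zip nums2)).map
          (fun p => (p.2.1, p.2.2, p.1))).filter
        (fun u => decide (u.1 < c))).map (fun u => u.2.1))
      = (((nums1.zip nums2).filter (fun q => decide (q.1 < c))).map (fun q => q.2)) := by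
    conv_rhs => rw [← PySem.List.map_snd_enumerate (nums1.zip nums2) 0]
    rw [List.filter_map, List.filter_map, List.map_map, List.map_map]
    rfl
  rw [h2]

lemma length_foldl_setF (F : (Int × Int × Int) → Int) :
    ∀ (l : List (Int × Int × Int)) (ans : List Int),
    (l.foldl (fun ac u => ac.set u.2.2.toNat (F u)) ans).length = ans.length := by
  intro l
  induction l with
  | nil => intro ans; rfl
  | cons u t ih => intro ans; simp [List.foldl_cons, ih]

lemma foldl_set_getD (F : (Int × Int × Int) → Int) :
    ∀ (l : List (Int × Int × Int)) (ans : List Int) (j : Nat),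
    (∀ u ∈ l, u.2.2.toNat < ans.length) →
    (l.foldl (fun ac u => ac.set u.2.2.toNat (F u)) ans).getD j 0
      = (match l.reverse.find? (fun u => u.2.2.toNat == j) with
         | some u => F u
         | none => ans.getD j 0) := by
  intro l
  induction l with
  | nil => intro ans j _; rfl
  | cons u t ih =>
    intro ans j hb
    rw [List.foldl_cons, ih _ j (fun v hv => by simpa using hb v (by simp [hv]))]
    rw [List.reverse_cons, List.find?_append]
    cases hf : t.reverse.find? (fun u => u.2.2.toNat == j) with
    | some w => simp
    | none =>
      simp only [Option.none_or]
      by_cases hj : u.2.2.toNat = j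
      · subst hj
        simp only [List.find?, beq_self_eq_true]
        rw [List.getD_eq_getElem?_getD, List.getElem?_set_self (hb u (by simp))]
        rfl
      · have : (u.2.2.toNat == j) = false := by simp [hj]
        simp only [List.find?, this]
        rw [List.getD_eq_getElem?_getD, List.getD_eq_getElem?_getD,
          List.getElem?_set_ne hj]

lemma mem_pvTriples (nums1 nums2 : List Int) (u : Int × Int × Int)
    (hu : u ∈ pvTriples nums1 nums2) :
    ∃ (j : Nat) (hj : j < (nums1.zip nums2).length),
      u = ((nums1.zip nums2)[j].1, (nums1.zip nums2)[j].2, (j : Int)) := by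
  have hperm := PySem.List.sorted2_perm
    ((PySem.List.enumerate (nums1.zip nums2)).map (fun p => (p.2.1, p.2.2, p.1)))
    (fun t : Int × Int × Int => t.1) (fun t => t.2.1) false
  have hmem := hperm.mem_iff.mp hu
  obtain ⟨p, hp, hpu⟩ := List.mem_map.mp hmem
  obtain ⟨j, hj, hpe⟩ := (PySem.List.mem_enumerate_iff _ _ _).mp hp
  refine ⟨j, hj, ?_⟩
  rw [← hpu, hpe]
  simp

lemma triple_mem_pvTriples (nums1 nums2 : List Int) (j : Nat)
    (hj : j < (nums1.zip nums2).length) :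
    ((nums1.zip nums2)[j].1, (nums1.zip nums2)[j].2, (j : Int)) ∈ pvTriples nums1 nums2 := by
  have hperm := PySem.List.sorted2_perm
    ((PySem.List.enumerate (nums1.zip nums2)).map (fun p => (p.2.1, p.2.2, p.1)))
    (fun t : Int × Int × Int => t.1) (fun t => t.2.1) false
  unfold pvTriples
  rw [hperm.mem_iff]
  refine List.mem_map.mpr ⟨((j : Int), (nums1.zip nums2)[j]), ?_, rfl⟩
  exact (PySem.List.mem_enumerate_iff _ _ _).mpr ⟨j, hj, by simp⟩

lemma gval_eq_bval (nums1 nums2 : List Int) (k c : Int) :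
    gval k (pvTriples nums1 nums2) c
      = ((PySem.List.sorted (((nums1.zip nums2).filter (fun q => decide (q.1 < c))).map
            (fun q => q.2)) (fun v => v) true).take k.toNat).sum := by
  rw [take_dsort_sum]
  exact topk_sum_perm k (filter_map_triples nums1 nums2 c)

lemma length_pvTriples (nums1 nums2 : List Int) :
    (pvTriples nums1 nums2).length = (nums1.zip nums2).length := by
  have hperm := PySem.List.sorted2_perm
    ((PySem.List.enumerate (nums1.zip nums2)).map (fun p => (p.2.1, p.2.2, p.1)))
    (fun t : Int × Int × Int => t.1) (fun t => t.2.1) false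
  unfold pvTriples
  rw [hperm.length_eq]
  simp [PySem.List.length_enumerate]

-- ===== VERDICT (by name: the statement is the Claim_ definition above) =====
theorem solve_spec : Claim_equal_solve := by
  intro nums1 nums2 k _
  unfold Spec_solve
  have hidxlt := triples_idx_lt nums1 nums2
  have hlen := length_pvTriples nums1 nums2
  have h1 : solve nums1 nums2 k
      = (pvTriples nums1 nums2).foldl
          (fun ac u => ac.set u.2.2.toNat (gval k (pvTriples nums1 nums2) u.1))
          (List.replicate (pvTriples nums1 nums2).length 0) := by
    show aloop k (pvTriples nums1 nums2) none
        (List.replicate (pvTriples nums1 nums2).length 0) [] 0 = _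
    rw [aloop_eq_bloop k (pvTriples nums1 nums2).length _ none _ [] 0 le_rfl
      (by simpa using hidxlt) (fun p hp => by simp at hp)]
    have := bloop_char k (pvTriples nums1 nums2) (pvTriples_pairwise nums1 nums2)
      (pvTriples nums1 nums2).length (pvTriples nums1 nums2) []
      (List.replicate (pvTriples nums1 nums2).length 0) le_rfl (by simp) (by simp)
    simpa [bloop] using this
  rw [h1]
  apply List.ext_getElem
  · rw [length_foldl_setF]
    simp [solve_alt, hlen]
  · intro j hj hj'
    have hjlen : j < (nums1.zip nums2).length := by
      rwa [length_foldl_setF, List.length_replicate, hlen] at hj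
    rw [← List.getD_eq_getElem _ 0, ← List.getD_eq_getElem _ 0]
    rw [foldl_set_getD _ _ _ _ (by simpa using hidxlt)]
    have hex : ((pvTriples nums1 nums2).reverse.find? (fun u => u.2.2.toNat == j)).isSome := by
      rw [List.find?_isSome]
      exact ⟨_, List.mem_reverse.mpr (triple_mem_pvTriples nums1 nums2 j hjlen), by simp⟩
    cases hf : (pvTriples nums1 nums2).reverse.find? (fun u => u.2.2.toNat == j) with
    | none => rw [hf] at hex; simp at hex
    | some u =>
      have hpu : u.2.2.toNat = j := by simpa using List.find?_some hf
      have humem : u ∈ pvTriples nums1 nums2 :=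
        List.mem_reverse.mp (List.mem_of_find?_eq_some hf)
      obtain ⟨i, hi, hue⟩ := mem_pvTriples nums1 nums2 u humem
      have hij : i = j := by rw [hue] at hpu; simpa using hpu
      subst hij
      simp only
      rw [hue]
      simp only [gval_eq_bval nums1 nums2 k]
      unfold solve_alt
      rw [List.getD_eq_getElem?_getD, List.getElem?_map,
        List.getElem?_eq_getElem hjlen]
      rfl
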